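-- pv_equiv track=rewrite | github.com/JustTOMEK/pipr | 1v1_prep/air_folder/1_4.py | odd_greater_than_3
-- ===== SOURCE A (Python) =====
-- def odd_greater_than_3(numbers):
--     sum_of_odd = 0
--     sum_off_3 = 0
--     for index in range(len(numbers)):
--         if index % 2 == 1:
--             sum_of_odd += numbers[index]
--         if (index) % 3 == 0:
--             sum_off_3 += numbers[index]
--     return sum_of_odd > sum_off_3
-- ===== SOURCE B (Python) =====
-- def odd_greater_than_3(numbers):
--     def every(start, gap):
--         # sum of numbers[start], numbers[start + (1+gap)], numbers[start + 2*(1+gap)], ...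
--         total = 0
--         i = start
--         while i < len(numbers):
--             total += numbers[i]
--             i += 1 + gap
--         return total
--     return every(1, 1) > every(0, 2)
-- ===== Notes on version B (the rewrite author's own statement) =====
-- stated objective: alternative
-- what changed: Replaces the single indexed pass with two modulus tests by two independent strided passes: a helper sums every (1+gap)-th element starting at a given index, called once for the odd indices (start 1, stride 2) and once for the indices divisible by 3 (start 0, stride 3); no parity or mod-3 tests remain.
import Mathlib
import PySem

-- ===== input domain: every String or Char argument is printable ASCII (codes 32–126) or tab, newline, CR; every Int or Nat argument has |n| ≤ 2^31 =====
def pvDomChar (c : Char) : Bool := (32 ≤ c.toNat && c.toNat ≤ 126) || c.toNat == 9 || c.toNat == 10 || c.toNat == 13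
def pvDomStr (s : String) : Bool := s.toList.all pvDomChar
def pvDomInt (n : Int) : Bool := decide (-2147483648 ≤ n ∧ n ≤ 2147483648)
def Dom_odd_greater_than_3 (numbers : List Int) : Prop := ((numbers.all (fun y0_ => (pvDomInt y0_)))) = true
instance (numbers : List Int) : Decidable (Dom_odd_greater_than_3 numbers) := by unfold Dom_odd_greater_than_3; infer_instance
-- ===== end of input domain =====

-- B replaces A's single indexed pass with two modulus tests by two independent strided
-- index passes (stride 2 from index 1, stride 3 from index 0); same O(n) cost, alternative decomposition.


-- ===== PORT A =====
-- loop body of A, one iteration: the two independent `if`s in source order.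
-- numbers[index] is ported as pyGetD … 0: index ∈ range(len(numbers)) is always in bounds,
-- so this is exact.
def pvStepA (numbers : List Int) (s : Int × Int) (index : Int) : Int × Int :=
  let s1 := if index % 2 == 1 then (s.1 + PySem.List.pyGetD numbers index 0, s.2) else s
  if index % 3 == 0 then (s1.1, s1.2 + PySem.List.pyGetD numbers index 0) else s1

def odd_greater_than_3 (numbers : List Int) : Bool :=
  let p := (PySem.List.pyRange 0 (PySem.List.len numbers)).foldl (pvStepA numbers) (0, 0)
  decide (p.1 > p.2)

-- ===== PORT B =====
-- Source B's helper `every(start, gap)`: while i < len(numbers): total += numbers[i]; i += 1 + gap.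
-- i only ever takes nonnegative values here, so it is a Nat and numbers[i] in bounds is
-- numbers[i]?.getD 0 — exact (the guard i < len makes the access in range).
def pvEveryLoop (numbers : List Int) (gap : Nat) (i : Nat) : Int :=
  if _h : i < numbers.length then
    (numbers[i]?.getD 0) + pvEveryLoop numbers gap (i + (1 + gap))
  else 0
termination_by numbers.length - i
decreasing_by omega

def odd_greater_than_3_alt (numbers : List Int) : Bool :=
  decide (pvEveryLoop numbers 1 1 > pvEveryLoop numbers 2 0)

-- ===== PRECONDITION & SPEC =====
def Spec_odd_greater_than_3 (numbers : List Int) (out : Bool) : Prop := out = odd_greater_than_3_alt numbers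
instance (numbers : List Int) (out : Bool) : Decidable (Spec_odd_greater_than_3 numbers out) := by unfold Spec_odd_greater_than_3; infer_instance

-- ===== CLAIM (what is proved, stated in full; the proofs are below) =====
def Claim_equal_odd_greater_than_3 : Prop := ∀ (numbers : List Int), Dom_odd_greater_than_3 numbers → Spec_odd_greater_than_3 numbers (odd_greater_than_3 numbers)

-- ===== LEMMAS AND PROOFS =====

-- sum of elements at odd "current-flag" positions: flag b says the head's index is odd
def oddSum : Bool → List Int → Int
  | _, [] => 0
  | b, x :: r => (if b then x else 0) + oddSum (!b) r

-- sum of elements whose index ≡ 0 (mod 3); counter c is the head's index mod 3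
def thirdSum : Nat → List Int → Int
  | _, [] => 0
  | c, x :: r => (if c == 0 then x else 0) + thirdSum ((c + 1) % 3) r

theorem loopA (numbers : List Int) (i : Nat) (s : Int × Int) :
    (PySem.List.pyRange i numbers.length).foldl (pvStepA numbers) s
      = (s.1 + oddSum (i % 2 == 1) (numbers.drop i),
         s.2 + thirdSum (i % 3) (numbers.drop i)) := by
  by_cases h : i < numbers.length
  · rw [PySem.List.pyRange_one_cons (by exact_mod_cast h)]
    have hcast : ((i : Int) + 1) = ((i + 1 : Nat) : Int) := by push_cast; ring
    rw [List.foldl_cons, hcast, loopA numbers (i + 1)]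
    have hget : PySem.List.pyGetD numbers (i : Int) 0 = numbers[i] := by
      simp [PySem.List.pyGetD, PySem.List.pyGet?, PySem.List.pyIdx?, h]
    have hdrop : numbers.drop i = numbers[i] :: numbers.drop (i + 1) :=
      List.drop_eq_getElem_cons h
    have h2 : (((i : Int)) % 2 == 1) = (i % 2 == 1) := by
      rcases Nat.even_or_odd i with ⟨k, hk⟩ | ⟨k, hk⟩ <;> subst hk <;> simp <;> omega
    have h3 : (((i : Int)) % 3 == 0) = (i % 3 == 0) := by
      have hm : (i : Int) % 3 = ((i % 3 : Nat) : Int) := by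
        omega
      rw [hm]; cases hv : i % 3 with
      | zero => simp
      | succ n => simp; omega
    rw [hdrop]
    simp only [pvStepA, hget, h2, h3, oddSum, thirdSum]
    have hflag : ((i + 1) % 2 == 1) = !(i % 2 == 1) := by
      rcases Nat.mod_two_eq_zero_or_one i with hk | hk <;> simp [Nat.add_mod, hk]
    have hc3 : ((i % 3) + 1) % 3 = (i + 1) % 3 := by omega
    rw [hflag, hc3]
    by_cases p2 : i % 2 = 1 <;> by_cases p3 : i % 3 = 0 <;>
      simp [p2, p3, add_assoc]
  · have hle : numbers.length ≤ i := Nat.le_of_not_lt h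
    have h1 : PySem.List.pyRange (i : Int) (numbers.length : Int) = [] := by
      simp [PySem.List.pyRange]
      intro hlt
      exact absurd (by exact_mod_cast hlt) (Nat.not_lt.mpr hle)
    have h2 : numbers.drop i = [] := List.drop_eq_nil_of_le hle
    simp [h1, h2, oddSum, thirdSum]
termination_by numbers.length - i
decreasing_by omega

-- proof-side view of pvEveryLoop: structural recursion on the remaining suffix
def everyL (gap : Nat) : List Int → Int
  | [] => 0
  | x :: rest => x + everyL gap (rest.drop gap)
termination_by xs => xs.length
decreasing_by simp [List.length_drop]

theorem loopB (numbers : List Int) (gap : Nat) (i : Nat) :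
    pvEveryLoop numbers gap i = everyL gap (numbers.drop i) := by
  by_cases h : i < numbers.length
  · have hdrop : numbers.drop i = numbers[i] :: numbers.drop (i + 1) :=
      List.drop_eq_getElem_cons h
    have hrec := loopB numbers gap (i + (1 + gap))
    have hdd : (numbers.drop (i + 1)).drop gap = numbers.drop (i + (1 + gap)) := by
      rw [List.drop_drop]
      congr 1
      omega
    rw [pvEveryLoop.eq_def, dif_pos h]
    conv_rhs => rw [hdrop, everyL.eq_def]
    simp [List.getElem?_eq_getElem h, hdd, hrec]
  · have h2 : numbers.drop i = [] := List.drop_eq_nil_of_le (Nat.le_of_not_lt h)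
    rw [pvEveryLoop.eq_def, dif_neg h, h2, everyL.eq_def]
termination_by numbers.length - i
decreasing_by omega

theorem every1_eq (xs : List Int) : everyL 1 xs = oddSum true xs := by
  match xs with
  | [] => rw [everyL.eq_def]; simp [oddSum]
  | y :: t =>
    rw [everyL.eq_def, oddSum]
    match t with
    | [] => simp [everyL.eq_def, oddSum]
    | z :: u =>
      have := every1_eq u
      simp [oddSum, List.drop, this]
termination_by xs.length

theorem every2_eq (xs : List Int) : everyL 2 xs = thirdSum 0 xs := by
  match xs with
  | [] => rw [everyL.eq_def]; simp [thirdSum]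
  | y :: t =>
    rw [everyL.eq_def, thirdSum]
    match t with
    | [] => simp [everyL.eq_def, thirdSum]
    | [z] => simp [everyL.eq_def, thirdSum]
    | z :: w :: u =>
      have := every2_eq u
      simp [thirdSum, List.drop, this]
termination_by xs.length

theorem oddSum_false (xs : List Int) : oddSum false xs = oddSum true (xs.drop 1) := by
  cases xs with
  | nil => simp [oddSum]
  | cons x r => simp [oddSum]

-- ===== VERDICT (by name: the statement is the Claim_ definition above) =====
theorem odd_greater_than_3_spec : Claim_equal_odd_greater_than_3 := by
  intro numbers _
  have h := loopA numbers 0 (0, 0)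
  simp only [Nat.cast_zero] at h
  simp [Spec_odd_greater_than_3, odd_greater_than_3, odd_greater_than_3_alt,
    PySem.List.len, h, loopB, every1_eq, every2_eq, oddSum_false]
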